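-- pv_equiv track=rewrite | github.com/BARarch/My-Hackerranks | numberRoundness200329.py | increaseNumberRoundness
-- ===== SOURCE A (Python) =====
-- def increaseNumberRoundness(n):
--     foundZero = False
--
--     for c in str(n):
--         if foundZero:
--             if c is not '0':
--                 return True
--         else:
--             if c is '0':
--                 foundZero = True
--
--     return False
-- ===== SOURCE B (Python) =====
-- def increaseNumberRoundness(n):
--     return '0' in str(n).rstrip('0')
-- ===== Notes on version B (the rewrite author's own statement) =====
-- stated objective: simpler
-- what changed: Replaced A's stateful foundZero flag scan with a stateless one-liner: strip trailing '0' characters from str(n) and test whether a '0' remains.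
import Mathlib
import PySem

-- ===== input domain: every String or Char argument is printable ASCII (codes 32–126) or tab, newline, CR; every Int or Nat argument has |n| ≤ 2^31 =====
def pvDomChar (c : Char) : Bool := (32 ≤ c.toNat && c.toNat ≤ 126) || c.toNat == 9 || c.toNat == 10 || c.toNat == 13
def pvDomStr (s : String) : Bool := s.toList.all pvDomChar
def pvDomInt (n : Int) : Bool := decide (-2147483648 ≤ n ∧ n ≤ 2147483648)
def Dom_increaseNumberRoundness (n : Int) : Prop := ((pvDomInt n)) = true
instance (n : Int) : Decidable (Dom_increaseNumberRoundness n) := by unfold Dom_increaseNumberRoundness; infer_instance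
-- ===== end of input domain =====

-- B replaces A's stateful foundZero flag scan by: strip trailing zeros, then ask whether a '0' remains (objective: simpler).
-- Note: Python's `c is '0'` on single-char strings behaves as equality in CPython (interning); ported as equality.

-- ===== PORT A =====
-- the for-loop of A, carrying the foundZero flag
def loopA : List Char → Bool → Bool
  | [], _ => false
  | c :: cs, foundZero =>
    if foundZero then
      if c != '0' then true else loopA cs foundZero
    else
      if c == '0' then loopA cs true else loopA cs foundZero

def increaseNumberRoundness (n : Int) : Bool :=
  loopA (PySem.Int.toChars n) false

-- ===== PORT B =====
-- str(n).rstrip('0'): hand-ported (PySem has no rstrip-with-chars); exact for a single strip character.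
def rstripZeros (cs : List Char) : List Char :=
  (cs.reverse.dropWhile (· == '0')).reverse

def increaseNumberRoundness_alt (n : Int) : Bool :=
  PySem.Chars.isIn ['0'] (rstripZeros (PySem.Int.toChars n))

-- ===== PRECONDITION & SPEC =====
def Spec_increaseNumberRoundness (n : Int) (out : Bool) : Prop := out = increaseNumberRoundness_alt n
instance (n : Int) (out : Bool) : Decidable (Spec_increaseNumberRoundness n out) := by unfold Spec_increaseNumberRoundness; infer_instance

-- ===== CLAIM (what is proved, stated in full; the proofs are below) =====
def Claim_equal_increaseNumberRoundness : Prop := ∀ (n : Int), Dom_increaseNumberRoundness n → Spec_increaseNumberRoundness n (increaseNumberRoundness n)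

-- ===== LEMMAS AND PROOFS =====

theorem isIn_singleton_zero (s : List Char) :
    PySem.Chars.isIn ['0'] s = s.contains '0' := by
  rcases h : s.contains '0' with _ | _
  · rw [PySem.Chars.isIn_eq_false_iff]
    intro hinf
    have : '0' ∈ s := hinf.subset (by simp)
    simp [List.contains_eq_mem, this] at h
  · rw [PySem.Chars.isIn_iff_infix]
    have : '0' ∈ s := by simpa [List.contains_eq_mem] using h
    obtain ⟨u, v, rfl⟩ := List.append_of_mem this
    exact ⟨u, v, by simp⟩

theorem loopA_true (cs : List Char) :
    loopA cs true = cs.any (fun c => c != '0') := by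
  induction cs with
  | nil => rfl
  | cons c cs ih =>
    by_cases hc : c = '0' <;> simp [loopA, hc, ih]

theorem loopA_false (cs : List Char) :
    loopA cs false = (rstripZeros cs).contains '0' := by
  induction cs with
  | nil => rfl
  | cons c cs ih =>
    by_cases hc : c = '0'
    · subst hc
      simp only [loopA, Bool.false_eq_true, if_false, BEq.rfl, if_pos, loopA_true]
      unfold rstripZeros
      rw [List.reverse_cons, List.dropWhile_append]
      rcases hdw : cs.reverse.dropWhile (· == '0') with _ | ⟨d, ds⟩
      · have : ∀ x ∈ cs, x = '0' := by
          intro x hx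
          have := (List.dropWhile_eq_nil_iff.mp hdw) x (by simpa using hx)
          simpa using this
        simp only [List.isEmpty_nil, if_pos]
        have : cs.any (fun c => c != '0') = false := by
          simp only [List.any_eq_false]
          intro x hx; simpa using this x hx
        simp [this]
      · rw [if_neg (by simp)]
        have hmem : d ∈ cs.reverse.dropWhile (· == '0') := by rw [hdw]; simp
        have : d ∈ cs := by
          have := List.dropWhile_sublist (p := (· == '0')) (l := cs.reverse)
          exact List.mem_reverse.mp (this.subset hmem)
        have hd : d ≠ '0' := by
          have := List.head_dropWhile_not (p := (· == '0')) (l := cs.reverse) (by simp [hdw])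
          simpa [hdw] using this
        have : cs.any (fun c => c != '0') = true := by
          rw [List.any_eq_true]; exact ⟨d, ‹d ∈ cs›, by simpa using hd⟩
        simp [this]
    · simp only [loopA, Bool.false_eq_true, if_false, ih]
      rw [if_neg (by simpa using hc)]
      unfold rstripZeros
      rw [List.reverse_cons, List.dropWhile_append]
      rcases hdw : cs.reverse.dropWhile (· == '0') with _ | ⟨d, ds⟩
      · simp [hc, Ne.symm hc]
      · simp [Ne.symm hc]

-- ===== VERDICT (by name: the statement is the Claim_ definition above) =====
theorem increaseNumberRoundness_spec : Claim_equal_increaseNumberRoundness := by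
  intro n _
  unfold Spec_increaseNumberRoundness increaseNumberRoundness increaseNumberRoundness_alt
  rw [loopA_false, isIn_singleton_zero]
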